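-- pv_equiv track=rewrite | github.com/maharr/adventcode21 | 8/8.py | convertoutput
-- ===== SOURCE A (Python) =====
-- def convertoutput(command, seg):
--     sums = 0
--     vals = sorted(list(command))
--     for v in vals:
--         sum = 0
--         if v == 'a':
--             sum += 1
--         elif v == 'b':
--             sum += 2
--         elif v == 'c':
--             sum += 4
--         elif v == 'd':
--             sum += 8
--         elif v == 'e':
--             sum += 16
--         elif v == 'f':
--             sum += 32
--         elif v == 'g':
--             sum += 64
--         for i,s in enumerate(seg):
--             if sum == s:
--                 sums += 2**i
--
--
--     return sums
-- ===== SOURCE B (Python) =====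
-- def convertoutput(command, seg):
--     bit = {'a': 1, 'b': 2, 'c': 4, 'd': 8, 'e': 16, 'f': 32, 'g': 64}
--     counts = {}
--     for ch in command:
--         v = bit.get(ch, 0)
--         counts[v] = counts.get(v, 0) + 1
--     sums = 0
--     for i, s in enumerate(seg):
--         sums += counts.get(s, 0) * 2**i
--     return sums
-- ===== Notes on version B (the rewrite author's own statement) =====
-- stated objective: faster
-- what changed: A rescans seg once for every (sorted) letter of command; B builds a letter-to-bit dict and a count dict over bit values in one pass over command, then makes a single weighted pass over seg adding count*2**i.
import Mathlib
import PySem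

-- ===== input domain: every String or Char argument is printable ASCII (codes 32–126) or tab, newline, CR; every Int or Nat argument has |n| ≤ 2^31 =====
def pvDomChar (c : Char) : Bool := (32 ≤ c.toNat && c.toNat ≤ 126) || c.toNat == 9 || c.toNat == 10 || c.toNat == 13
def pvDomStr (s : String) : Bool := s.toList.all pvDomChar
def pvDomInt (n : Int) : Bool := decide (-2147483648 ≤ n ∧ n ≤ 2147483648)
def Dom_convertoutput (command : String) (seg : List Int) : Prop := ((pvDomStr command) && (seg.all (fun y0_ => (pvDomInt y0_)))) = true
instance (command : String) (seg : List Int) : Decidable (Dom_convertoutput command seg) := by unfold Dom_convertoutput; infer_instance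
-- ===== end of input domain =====

-- B replaces A's per-letter rescan of seg by a count-per-bit-value dict and ONE weighted pass over seg (objective: faster, one pass each over command and seg).

-- ===== PORT A =====
def convertoutput (command : String) (seg : List Int) : Int :=
  let vals := PySem.List.sorted command.toList (fun x => x) false
  vals.foldl (fun sums v =>
    let sum : Int :=
      if v = 'a' then 0 + 1
      else if v = 'b' then 0 + 2
      else if v = 'c' then 0 + 4
      else if v = 'd' then 0 + 8
      else if v = 'e' then 0 + 16
      else if v = 'f' then 0 + 32
      else if v = 'g' then 0 + 64
      else 0
    (PySem.List.enumerate seg 0).foldl (fun sums p =>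
      if sum = p.2 then sums + 2 ^ p.1.toNat else sums) sums) 0

-- ===== PORT B =====
def convertoutput_alt (command : String) (seg : List Int) : Int :=
  let bit : PySem.Dict Char Int :=
    PySem.Dict.ofList [('a', 1), ('b', 2), ('c', 4), ('d', 8), ('e', 16), ('f', 32), ('g', 64)]
  let counts : PySem.Dict Int Int :=
    command.toList.foldl (fun d ch =>
      let v := bit.getD ch 0
      d.insert v (d.getD v 0 + 1)) PySem.Dict.empty
  (PySem.List.enumerate seg 0).foldl (fun sums p =>
    sums + counts.getD p.2 0 * 2 ^ p.1.toNat) 0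

-- ===== PRECONDITION & SPEC =====
def Spec_convertoutput (command : String) (seg : List Int) (out : Int) : Prop := out = convertoutput_alt command seg
instance (command : String) (seg : List Int) (out : Int) : Decidable (Spec_convertoutput command seg out) := by unfold Spec_convertoutput; infer_instance

-- ===== CLAIM (what is proved, stated in full; the proofs are below) =====
def Claim_equal_convertoutput : Prop := ∀ (command : String) (seg : List Int), Dom_convertoutput command seg → Spec_convertoutput command seg (convertoutput command seg)

-- ===== LEMMAS AND PROOFS =====

-- value of A's if-chain (named so reusable in lemmas)
def pvBit (v : Char) : Int :=
  if v = 'a' then 0 + 1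
  else if v = 'b' then 0 + 2
  else if v = 'c' then 0 + 4
  else if v = 'd' then 0 + 8
  else if v = 'e' then 0 + 16
  else if v = 'f' then 0 + 32
  else if v = 'g' then 0 + 64
  else 0

lemma bit_eq (v : Char) :
    (PySem.Dict.ofList [('a', (1:Int)), ('b', 2), ('c', 4), ('d', 8), ('e', 16), ('f', 32), ('g', 64)]).getD v 0
      = pvBit v := by
  by_cases h1 : v = 'a'; · subst h1; decide
  by_cases h2 : v = 'b'; · subst h2; decide
  by_cases h3 : v = 'c'; · subst h3; decide
  by_cases h4 : v = 'd'; · subst h4; decide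
  by_cases h5 : v = 'e'; · subst h5; decide
  by_cases h6 : v = 'f'; · subst h6; decide
  by_cases h7 : v = 'g'; · subst h7; decide
  have f : ∀ c : Char, ¬ v = c → (c == v) = false := fun c h => beq_eq_false_iff_ne.mpr (Ne.symm h)
  rw [show PySem.Dict.ofList [('a', (1:Int)), ('b', 2), ('c', 4), ('d', 8), ('e', 16), ('f', 32), ('g', 64)]
        = PySem.Dict.mk [('a', 1), ('b', 2), ('c', 4), ('d', 8), ('e', 16), ('f', 32), ('g', 64)] by decide]
  simp [PySem.Dict.getD_eq_get?_getD, PySem.Dict.get?,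
    f _ h1, f _ h2, f _ h3, f _ h4, f _ h5, f _ h6, f _ h7, pvBit, h1, h2, h3, h4, h5, h6, h7]

lemma foldl_insert_key (l : List Char) (d : PySem.Dict Int Int) :
    l.foldl (fun d ch => d.insert (pvBit ch) (d.getD (pvBit ch) 0 + 1)) d
      = (l.map pvBit).foldl (fun d x => d.insert x (d.getD x 0 + 1)) d := by
  induction l generalizing d with
  | nil => rfl
  | cons c tl ih => simp [ih]

-- A's inner loop as a sum
lemma foldl_ite_add (e : List (Int × Int)) (a s : Int) :
    e.foldl (fun sums p => if s = p.2 then sums + 2 ^ p.1.toNat else sums) a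
      = a + (e.map (fun p => if s = p.2 then (2:Int) ^ p.1.toNat else 0)).sum := by
  induction e generalizing a with
  | nil => simp
  | cons p t ih =>
    simp only [List.foldl_cons, List.map_cons, List.sum_cons, ih]
    split_ifs <;> ring

-- exchanging the two summations: per-letter rescans of seg = one weighted pass
lemma exchange (l : List Char) (e : List (Int × Int)) :
    (l.map (fun v => (e.map (fun p => if pvBit v = p.2 then (2:Int) ^ p.1.toNat else 0)).sum)).sum
      = (e.map (fun p => ((l.map pvBit).count p.2 : Int) * 2 ^ p.1.toNat)).sum := by
  induction l with
  | nil => simp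
  | cons v t ih =>
    simp only [List.map_cons, List.sum_cons, ih, List.count_cons]
    have : ∀ p : Int × Int,
        ((((t.map pvBit).count p.2 : Nat) + if pvBit v == p.2 then 1 else 0 : Nat) : Int) * 2 ^ p.1.toNat
          = (if pvBit v = p.2 then (2:Int) ^ p.1.toNat else 0)
            + ((t.map pvBit).count p.2 : Int) * 2 ^ p.1.toNat := by
      intro p
      by_cases h : pvBit v = p.2
      · simp [h]; push_cast; ring
      · simp [h]
    rw [← List.sum_map_add]
    exact congrArg List.sum (List.map_congr_left (fun p _ => (this p).symm))

-- ===== VERDICT (by name: the statement is the Claim_ definition above) =====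
theorem convertoutput_spec : Claim_equal_convertoutput := by
  intro command seg _
  unfold Spec_convertoutput convertoutput convertoutput_alt
  simp only [foldl_ite_add]
  -- name the pieces
  set l := command.toList with hl
  set e := PySem.List.enumerate seg 0 with he
  -- A's outer loop is a sum over the sorted letters
  rw [show (fun (sums : Int) (v : Char) =>
        sums + (e.map (fun p => if (if v = 'a' then (0:Int) + 1
          else if v = 'b' then 0 + 2 else if v = 'c' then 0 + 4 else if v = 'd' then 0 + 8
          else if v = 'e' then 0 + 16 else if v = 'f' then 0 + 32 else if v = 'g' then 0 + 64
          else 0) = p.2 then (2:Int) ^ p.1.toNat else 0)).sum)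
      = (fun (sums : Int) (v : Char) =>
        sums + (e.map (fun p => if pvBit v = p.2 then (2:Int) ^ p.1.toNat else 0)).sum) from rfl]
  rw [PySem.List.foldl_add]
  -- B's loop is a sum over enumerate
  rw [PySem.List.foldl_add]
  -- sorted is a permutation of l
  rw [List.Perm.sum_eq (List.Perm.map _ (PySem.List.sorted_perm l (fun x => x) false))]
  -- B's counts dict counts bit values
  have hcount : ∀ s : Int,
      (l.foldl (fun d ch =>
          d.insert ((PySem.Dict.ofList [('a', (1:Int)), ('b', 2), ('c', 4), ('d', 8), ('e', 16), ('f', 32), ('g', 64)]).getD ch 0)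
            ((d.getD ((PySem.Dict.ofList [('a', (1:Int)), ('b', 2), ('c', 4), ('d', 8), ('e', 16), ('f', 32), ('g', 64)]).getD ch 0) 0) + 1))
        PySem.Dict.empty).getD s 0 = ((l.map pvBit).count s : Int) := by
    intro s
    rw [show (fun (d : PySem.Dict Int Int) (ch : Char) =>
          d.insert ((PySem.Dict.ofList [('a', (1:Int)), ('b', 2), ('c', 4), ('d', 8), ('e', 16), ('f', 32), ('g', 64)]).getD ch 0)
            ((d.getD ((PySem.Dict.ofList [('a', (1:Int)), ('b', 2), ('c', 4), ('d', 8), ('e', 16), ('f', 32), ('g', 64)]).getD ch 0) 0) + 1))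
        = (fun (d : PySem.Dict Int Int) (ch : Char) => d.insert (pvBit ch) (d.getD (pvBit ch) 0 + 1)) from by
          funext d ch; rw [bit_eq]]
    rw [foldl_insert_key, PySem.Dict.getD_foldl_insert_add_one]
    simp
  simp only [hcount]
  rw [exchange]
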